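-- pv_equiv track=rewrite | github.com/EleutherAI/sae-auto-interp | sae_auto_interp/experiments/sampling.py | split_quantiles
-- ===== SOURCE A (Python) =====
-- def split_quantiles(arr, n_quantiles):
--     quantiles = []
--     quantile_size = len(arr) // n_quantiles
--     remainder = len(arr) % n_quantiles
--
--     start = 0
--     for i in range(n_quantiles):
--         end = start + quantile_size
--         if i < remainder:
--             end += 1
--         quantiles.append(arr[start:end])
--         start = end
--
--     return quantiles
-- ===== SOURCE B (Python) =====
-- def split_quantiles(arr, n_quantiles):
--     if n_quantiles <= 0:
--         return []
--     q, r = divmod(len(arr), n_quantiles)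
--     buckets = [[] for _ in range(n_quantiles)]
--     for j, x in enumerate(arr):
--         i = j // (q + 1) if j < (q + 1) * r else r + (j - (q + 1) * r) // q
--         buckets[i].append(x)
--     return buckets
-- ===== Notes on version B (the rewrite author's own statement) =====
-- stated objective: alternative
-- what changed: B never slices: it computes each element's chunk index by a closed-form per-element key and distributes elements into pre-allocated buckets in one pass, instead of A's per-chunk slicing driven by a running start/end cursor.
import Mathlib
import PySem

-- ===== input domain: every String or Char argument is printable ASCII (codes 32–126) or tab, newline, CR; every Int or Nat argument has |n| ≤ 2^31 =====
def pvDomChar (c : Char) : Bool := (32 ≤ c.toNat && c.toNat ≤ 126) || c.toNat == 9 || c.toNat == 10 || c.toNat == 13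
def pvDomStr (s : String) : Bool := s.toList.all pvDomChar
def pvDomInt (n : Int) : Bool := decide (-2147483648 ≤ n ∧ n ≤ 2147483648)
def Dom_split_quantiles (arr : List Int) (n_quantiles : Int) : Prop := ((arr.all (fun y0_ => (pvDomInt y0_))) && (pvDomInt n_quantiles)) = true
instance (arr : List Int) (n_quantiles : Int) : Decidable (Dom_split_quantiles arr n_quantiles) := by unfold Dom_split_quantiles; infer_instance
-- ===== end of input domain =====

-- B classifies each element into its chunk by a closed-form per-element key (a bucket pass
-- over the elements) instead of A's per-chunk slicing with a running cursor (objective: alternative).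

-- ===== PORT A =====
def split_quantiles (arr : List Int) (n_quantiles : Int) : List (List Int) :=
  let quantile_size : Int := PySem.Int.floordiv (arr.length : Int) n_quantiles
  let remainder : Int := PySem.Int.mod (arr.length : Int) n_quantiles
  let res := (PySem.List.pyRange 0 n_quantiles 1).foldl
    (fun (st : Int × List (List Int)) (i : Int) =>
      let e0 := st.1 + quantile_size
      let e := if i < remainder then e0 + 1 else e0
      (e, st.2 ++ [PySem.List.slice arr (some st.1) (some e)]))
    (0, [])
  res.2

-- ===== PORT B =====
def split_quantiles_alt (arr : List Int) (n_quantiles : Int) : List (List Int) :=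
  if n_quantiles ≤ 0 then []
  else
    let q : Int := PySem.Int.floordiv (arr.length : Int) n_quantiles
    let r : Int := PySem.Int.mod (arr.length : Int) n_quantiles
    let buckets : List (List Int) := (PySem.List.pyRange 0 n_quantiles 1).map (fun _ => ([] : List Int))
    (PySem.List.enumerate arr 0).foldl
      (fun (bs : List (List Int)) (p : Int × Int) =>
        let i : Int := if p.1 < (q + 1) * r then PySem.Int.floordiv p.1 (q + 1)
                       else r + PySem.Int.floordiv (p.1 - (q + 1) * r) q
        bs.modify i.toNat (fun b => b ++ [p.2]))
      buckets

-- ===== PRECONDITION & SPEC =====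
-- Python A raises ZeroDivisionError iff n_quantiles == 0; that input is the only exclusion.
def Pre_split_quantiles (arr : List Int) (n_quantiles : Int) : Prop := n_quantiles ≠ 0
instance (arr : List Int) (n_quantiles : Int) : Decidable (Pre_split_quantiles arr n_quantiles) := by unfold Pre_split_quantiles; infer_instance
def pvWitness_split_quantiles : List Int × Int := ([1, 2, 3, 4, 5], 2)

def Spec_split_quantiles (arr : List Int) (n_quantiles : Int) (out : List (List Int)) : Prop := out = split_quantiles_alt arr n_quantiles
instance (arr : List Int) (n_quantiles : Int) (out : List (List Int)) : Decidable (Spec_split_quantiles arr n_quantiles out) := by unfold Spec_split_quantiles; infer_instance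

-- ===== CLAIM (what is proved, stated in full; the proofs are below) =====
def Claim_equal_split_quantiles : Prop := ∀ (arr : List Int) (n_quantiles : Int), Dom_split_quantiles arr n_quantiles → Pre_split_quantiles arr n_quantiles → Spec_split_quantiles arr n_quantiles (split_quantiles arr n_quantiles)

-- ===== LEMMAS AND PROOFS =====

-- the common closed form both ports are reduced to: chunk i is arr[bound i : bound (i+1)]
-- with bound i = i*q + min i r
def sqC (arr : List Int) (n q r : Int) : List (List Int) :=
  (PySem.List.pyRange 0 n 1).map
    (fun i => PySem.List.slice arr (some (i * q + min i r)) (some ((i + 1) * q + min (i + 1) r)))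

-- B's per-element chunk key
def sqKey (q r j : Int) : Int :=
  if j < (q + 1) * r then PySem.Int.floordiv j (q + 1)
  else r + PySem.Int.floordiv (j - (q + 1) * r) q

-- A's accumulator loop over range(k, n), started at the closed-form start, yields the closed-form slices
lemma sq_loop (arr : List Int) (q r : Int) :
    ∀ (m : Nat) (k n : Int), (n - k).toNat = m →
    ∀ (acc : List (List Int)),
      ((PySem.List.pyRange k n 1).foldl
        (fun (st : Int × List (List Int)) (i : Int) =>
          let e0 := st.1 + q
          let e := if i < r then e0 + 1 else e0
          (e, st.2 ++ [PySem.List.slice arr (some st.1) (some e)]))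
        (k * q + min k r, acc)).2
      = acc ++ (PySem.List.pyRange k n 1).map
          (fun i => PySem.List.slice arr (some (i * q + min i r)) (some ((i + 1) * q + min (i + 1) r))) := by
  intro m
  induction m with
  | zero =>
    intro k n hm acc
    have h : n ≤ k := by omega
    simp [PySem.List.pyRange_one_eq_nil h]
  | succ m ih =>
    intro k n hm acc
    have hk : k < n := by omega
    rw [PySem.List.pyRange_one_cons hk]
    simp only [List.foldl_cons, List.map_cons]
    have he : (if k < r then k * q + min k r + q + 1 else k * q + min k r + q)
        = (k + 1) * q + min (k + 1) r := by
      split_ifs with h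
      · have h1 : min k r = k := by omega
        have h2 : min (k + 1) r = k + 1 := by omega
        rw [h1, h2]; ring
      · have h1 : min k r = r := by omega
        have h2 : min (k + 1) r = r := by omega
        rw [h1, h2]; ring
    rw [he]
    rw [ih (k + 1) n (by omega) (acc ++ [PySem.List.slice arr (some (k * q + min k r)) (some ((k + 1) * q + min (k + 1) r))])]
    simp

-- indices in an enumeration lie in [s, s + len)
lemma mem_enumerate_bounds (xs : List Int) (s : Int) (p : Int × Int)
    (h : p ∈ PySem.List.enumerate xs s) : s ≤ p.1 ∧ p.1 < s + xs.length := by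
  have h1 : p.1 ∈ (PySem.List.enumerate xs s).map Prod.fst := List.mem_map_of_mem h
  rw [PySem.List.map_fst_enumerate] at h1
  exact (PySem.List.mem_pyRange_one).1 h1

-- the bucket fold distributes each element to bucket (key j); result pointwise
lemma bucket_foldl (key : Int → Int) :
    ∀ (xs : List Int) (s : Int) (bs : List (List Int)),
    (∀ p ∈ PySem.List.enumerate xs s, 0 ≤ key p.1 ∧ (key p.1).toNat < bs.length) →
    (PySem.List.enumerate xs s).foldl
        (fun (bs : List (List Int)) (p : Int × Int) => bs.modify (key p.1).toNat (fun b => b ++ [p.2])) bs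
      = bs.mapIdx (fun i b => b ++
          (((PySem.List.enumerate xs s).filter (fun p => key p.1 == (i : Int))).map Prod.snd)) := by
  intro xs
  induction xs with
  | nil =>
    intro s bs _
    simp [PySem.List.enumerate]
    apply List.ext_getElem <;> simp
  | cons x xs ih =>
    intro s bs hb
    rw [PySem.List.enumerate_cons] at hb ⊢
    rw [List.foldl_cons]
    have hx := hb (s, x) (List.mem_cons_self)
    rw [ih (s+1) _ (fun p hp => by
      have := hb p (List.mem_cons_of_mem _ hp)
      simpa [List.length_modify] using this)]
    apply List.ext_getElem
    · simp [List.length_modify]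
    · intro i h1 h2
      simp only [List.getElem_mapIdx]
      rw [List.getElem_modify _ _ _ _ (by simpa [List.length_modify] using h1)]
      rw [List.filter_cons]
      by_cases hk : (key (s, x).1).toNat = i
      · have hki : key (s, x).1 = (i : Int) := by omega
        have hc : (key (s, x).1 == (i : Int)) = true := by simp [hki]
        rw [hc, if_pos rfl]
        simp [hk, List.append_assoc]
      · have hki : key (s, x).1 ≠ (i : Int) := by omega
        have hc : (key (s, x).1 == (i : Int)) = false := by simp [hki]
        rw [hc]
        simp [hk]

-- a window filter on an enumeration is a drop/take
lemma enum_filter_window (a b : Int) :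
    ∀ (xs : List Int) (s : Int), 0 ≤ s →
    (((PySem.List.enumerate xs s).filter (fun p => decide (a ≤ p.1) && decide (p.1 < b))).map Prod.snd)
      = (xs.drop (a - s).toNat).take (b - max a s).toNat := by
  intro xs
  induction xs with
  | nil => intro s _; simp [PySem.List.enumerate]
  | cons x xs ih =>
    intro s hs
    rw [PySem.List.enumerate_cons, List.filter_cons]
    by_cases h1 : a ≤ s
    · by_cases h2 : s < b
      · have hc : (decide (a ≤ (s, x).1) && decide ((s, x).1 < b)) = true := by simp [h1, h2]
        rw [hc]
        simp only [if_true, List.map_cons, ih (s+1) (by omega)]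
        have e1 : (a - s).toNat = 0 := by omega
        have e2 : (b - max a s).toNat = (b - max a (s+1)).toNat + 1 := by omega
        have e3 : (a - (s+1)).toNat = 0 := by omega
        rw [e1, e2, e3, List.drop_zero, List.drop_zero, List.take_succ_cons]
      · have hc : (decide (a ≤ (s, x).1) && decide ((s, x).1 < b)) = false := by simp [h2]
        rw [hc]
        simp only [Bool.false_eq_true, if_false, ih (s+1) (by omega)]
        have e2 : (b - max a s).toNat = 0 := by omega
        have e2' : (b - max a (s+1)).toNat = 0 := by omega
        rw [e2, e2', List.take_zero, List.take_zero]
    · have hc : (decide (a ≤ (s, x).1) && decide ((s, x).1 < b)) = false := by simp [h1]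
      rw [hc]
      simp only [Bool.false_eq_true, if_false, ih (s+1) (by omega)]
      have e1 : (a - s).toNat = (a - (s+1)).toNat + 1 := by omega
      have e2 : max a s = max a (s+1) := by omega
      rw [e1, e2, List.drop_succ_cons]

-- key bounds: 0 ≤ key j < n for 0 ≤ j < L
lemma key_bounds (L n q r j : Int) (hn : 0 < n)
    (hq : q = PySem.Int.floordiv L n) (hr : r = PySem.Int.mod L n)
    (hj : 0 ≤ j) (hjL : j < L) : 0 ≤ sqKey q r j ∧ sqKey q r j < n := by
  have hqr : q * n + r = L := by rw [hq, hr]; exact PySem.Int.floordiv_mul_add_mod L n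
  have hr0 : 0 ≤ r := hr ▸ PySem.Int.mod_nonneg L hn
  have hrn : r < n := hr ▸ PySem.Int.mod_lt L hn
  have hL0 : 0 ≤ L := le_trans hj (le_of_lt hjL)
  have hq0 : 0 ≤ q := by
    rw [hq, PySem.Int.floordiv_eq_ediv_of_pos hn]
    exact Int.ediv_nonneg hL0 (le_of_lt hn)
  unfold sqKey
  split_ifs with hb
  · constructor
    · rw [PySem.Int.floordiv_eq_ediv_of_pos (by omega)]
      exact Int.ediv_nonneg hj (by omega)
    · rw [PySem.Int.floordiv_lt_iff_lt_mul (by omega)]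
      nlinarith
  · push Not at hb
    by_cases hq1 : q = 0
    · subst hq1; simp at hb; nlinarith
    · have hqpos : 0 < q := by omega
      constructor
      · have : 0 ≤ PySem.Int.floordiv (j - (q + 1) * r) q := by
          rw [PySem.Int.floordiv_eq_ediv_of_pos hqpos]
          exact Int.ediv_nonneg (by omega) (by omega)
        omega
      · have h2 : PySem.Int.floordiv (j - (q + 1) * r) q < n - r := by
          rw [PySem.Int.floordiv_lt_iff_lt_mul hqpos]
          nlinarith
        omega

-- key j = i exactly on the closed-form window [bound i, bound (i+1))
lemma key_window (L n q r i j : Int) (hn : 0 < n)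
    (hq : q = PySem.Int.floordiv L n) (hr : r = PySem.Int.mod L n)
    (hi : 0 ≤ i) (hin : i < n) (hj : 0 ≤ j) (hjL : j < L) :
    (sqKey q r j = i) ↔ (i * q + min i r ≤ j ∧ j < (i + 1) * q + min (i + 1) r) := by
  have hqr : q * n + r = L := by rw [hq, hr]; exact PySem.Int.floordiv_mul_add_mod L n
  have hr0 : 0 ≤ r := hr ▸ PySem.Int.mod_nonneg L hn
  have hrn : r < n := hr ▸ PySem.Int.mod_lt L hn
  have hL0 : 0 ≤ L := le_trans hj (le_of_lt hjL)
  have hq0 : 0 ≤ q := by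
    rw [hq, PySem.Int.floordiv_eq_ediv_of_pos hn]
    exact Int.ediv_nonneg hL0 (le_of_lt hn)
  unfold sqKey
  split_ifs with hb
  · by_cases hir : i < r
    · have m1 : min i r = i := by omega
      have m2 : min (i + 1) r = i + 1 := by omega
      rw [m1, m2, PySem.Int.floordiv_eq_iff_of_pos (by omega)]
      constructor
      · rintro ⟨h1, h2⟩; constructor <;> nlinarith
      · rintro ⟨h1, h2⟩; constructor <;> nlinarith
    · have m1 : min i r = r := by omega
      have hlt : PySem.Int.floordiv j (q + 1) < r := by
        rw [PySem.Int.floordiv_lt_iff_lt_mul (by omega)]; nlinarith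
      constructor
      · intro h; omega
      · rintro ⟨h1, h2⟩; exfalso; rw [m1] at h1; nlinarith
  · push Not at hb
    by_cases hq1 : q = 0
    · subst hq1; simp at hb; exfalso; nlinarith
    · have hqpos : 0 < q := by omega
      by_cases hir : r ≤ i
      · have m1 : min i r = r := by omega
        have m2 : min (i + 1) r = r := by omega
        rw [m1, m2]
        have : (PySem.Int.floordiv (j - (q + 1) * r) q = i - r) ↔
            ((i - r) * q ≤ j - (q + 1) * r ∧ j - (q + 1) * r < (i - r + 1) * q) :=
          PySem.Int.floordiv_eq_iff_of_pos hqpos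
        constructor
        · intro h
          have h' := this.1 (by omega)
          constructor <;> nlinarith [h'.1, h'.2]
        · rintro ⟨h1, h2⟩
          have : PySem.Int.floordiv (j - (q + 1) * r) q = i - r := this.2 ⟨by nlinarith, by nlinarith⟩
          omega
      · have hfd : 0 ≤ PySem.Int.floordiv (j - (q + 1) * r) q := by
          rw [PySem.Int.floordiv_eq_ediv_of_pos hqpos]
          exact Int.ediv_nonneg (by omega) (by omega)
        have m2 : min (i + 1) r = i + 1 := by omega
        constructor
        · intro h; omega
        · rintro ⟨h1, h2⟩; exfalso; rw [m2] at h2; nlinarith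

-- A equals the closed form
lemma A_eq_sqC (arr : List Int) (n : Int) (hn : n ≠ 0) :
    split_quantiles arr n
      = sqC arr n (PySem.Int.floordiv (arr.length : Int) n) (PySem.Int.mod (arr.length : Int) n) := by
  unfold split_quantiles sqC
  rcases lt_trichotomy n 0 with h | h | h
  · simp [PySem.List.pyRange_one_eq_nil (le_of_lt h)]
  · exact absurd h hn
  · have hr : 0 ≤ PySem.Int.mod (arr.length : Int) n := PySem.Int.mod_nonneg _ h
    have hmin : min 0 (PySem.Int.mod (arr.length : Int) n) = 0 := by omega
    have hh := sq_loop arr (PySem.Int.floordiv (arr.length : Int) n)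
      (PySem.Int.mod (arr.length : Int) n) (n - 0).toNat 0 n rfl []
    simp only [zero_mul, hmin, add_zero, List.nil_append] at hh
    simpa using hh

-- B equals the closed form
lemma B_eq_sqC (arr : List Int) (n : Int) (hn : 0 < n) :
    split_quantiles_alt arr n
      = sqC arr n (PySem.Int.floordiv (arr.length : Int) n) (PySem.Int.mod (arr.length : Int) n) := by
  have hL0 : (0:Int) ≤ (arr.length : Int) := by positivity
  set L : Int := (arr.length : Int) with hL
  set q : Int := PySem.Int.floordiv L n with hq
  set r : Int := PySem.Int.mod L n with hr
  have hq0 : 0 ≤ q := by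
    rw [hq, PySem.Int.floordiv_eq_ediv_of_pos hn]
    exact Int.ediv_nonneg hL0 (le_of_lt hn)
  have hr0 : 0 ≤ r := hr ▸ PySem.Int.mod_nonneg L hn
  have hlenb : ((PySem.List.pyRange 0 n 1).map (fun _ => ([] : List Int))).length = n.toNat := by
    simp [PySem.List.length_pyRange_one]
  have hyp : ∀ p ∈ PySem.List.enumerate arr 0,
      0 ≤ sqKey q r p.1 ∧ (sqKey q r p.1).toNat < ((PySem.List.pyRange 0 n 1).map (fun _ => ([] : List Int))).length := by
    intro p hp
    have hb := mem_enumerate_bounds arr 0 p hp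
    have hk := key_bounds L n q r p.1 hn hq hr hb.1 (by omega)
    rw [hlenb]
    omega
  have h1 := bucket_foldl (sqKey q r) arr 0 ((PySem.List.pyRange 0 n 1).map (fun _ => ([] : List Int))) hyp
  have h2 : ((PySem.List.pyRange 0 n 1).map (fun _ => ([] : List Int))).mapIdx (fun i b => b ++
          (((PySem.List.enumerate arr 0).filter (fun p => sqKey q r p.1 == (i : Int))).map Prod.snd))
      = sqC arr n q r := by
    apply List.ext_getElem
    · simp [sqC, PySem.List.length_pyRange_one]
    · intro k hk1 hk2
      have hkn : k < n.toNat := by simpa [PySem.List.length_pyRange_one] using hk1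
      rw [List.getElem_mapIdx]
      have hbs : ((PySem.List.pyRange 0 n 1).map (fun _ => ([] : List Int)))[k]'(by omega ) = [] := by
        simp
      rw [hbs, List.nil_append]
      have hik : (0:Int) ≤ (k:Int) ∧ (k:Int) < n := by omega
      have hfc : (PySem.List.enumerate arr 0).filter (fun p => sqKey q r p.1 == ((k:Nat) : Int))
          = (PySem.List.enumerate arr 0).filter
              (fun p => decide ((k:Int) * q + min (k:Int) r ≤ p.1) && decide (p.1 < ((k:Int) + 1) * q + min ((k:Int) + 1) r)) := by
        apply List.filter_congr
        intro p hp
        have hb := mem_enumerate_bounds arr 0 p hp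
        have hw := key_window L n q r (k:Int) p.1 hn hq hr hik.1 hik.2 hb.1 (by omega)
        by_cases hcase : sqKey q r p.1 = (k:Int)
        · obtain ⟨hA, hB⟩ := hw.1 hcase
          simp [hcase, hA, hB]
        · have : ¬ ((k:Int) * q + min (k:Int) r ≤ p.1 ∧ p.1 < ((k:Int) + 1) * q + min ((k:Int) + 1) r) :=
            fun hcc => hcase (hw.2 hcc)
          by_cases hA : (k:Int) * q + min (k:Int) r ≤ p.1
          · have hB : ¬ p.1 < ((k:Int) + 1) * q + min ((k:Int) + 1) r := fun hB => this ⟨hA, hB⟩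
            simp [hcase, hB]
          · simp [hcase, hA]
      rw [hfc, enum_filter_window _ _ arr 0 (le_refl 0)]
      -- right side
      unfold sqC
      rw [List.getElem_map, PySem.List.getElem_pyRange_one]
      have e1 : ((0:Int) + (k:Int)) = (k:Int) := by omega
      rw [e1]
      have ha0 : 0 ≤ (k:Int) * q + min (k:Int) r := by
        have := mul_nonneg (by omega : (0:Int) ≤ (k:Int)) hq0
        omega
      have hb0 : 0 ≤ ((k:Int) + 1) * q + min ((k:Int) + 1) r := by
        have := mul_nonneg (by omega : (0:Int) ≤ (k:Int) + 1) hq0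
        omega
      rw [PySem.List.slice_toNat _ ha0 hb0]
      have e2 : ((k:Int) * q + min (k:Int) r - 0).toNat = ((k:Int) * q + min (k:Int) r).toNat := by
        omega
      have e3 : (((k:Int) + 1) * q + min ((k:Int) + 1) r - max ((k:Int) * q + min (k:Int) r) 0).toNat
          = (((k:Int) + 1) * q + min ((k:Int) + 1) r).toNat - ((k:Int) * q + min (k:Int) r).toNat := by
        omega
      rw [e2, e3]
  exact (by
    unfold split_quantiles_alt
    rw [if_neg (by omega)]
    exact h1.trans h2)

-- ===== VERDICT (by name: the statement is the Claim_ definition above) =====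
theorem split_quantiles_spec : Claim_equal_split_quantiles := by
  intro arr n _hdom hpre
  unfold Spec_split_quantiles
  rcases lt_trichotomy n 0 with h | h | h
  · unfold split_quantiles split_quantiles_alt
    simp [PySem.List.pyRange_one_eq_nil (le_of_lt h), le_of_lt h]
  · exact absurd h hpre
  · rw [A_eq_sqC arr n (by omega), B_eq_sqC arr n h]
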